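-- pv_equiv track=rewrite | github.com/wju98/flamecalculator | main.py | satisfyConstraints
-- ===== SOURCE A (Python) =====
-- def satisfyConstraints(equipstats, flametiers, numberOfIdentifiedLines, singlefactor, pairfactor, i, t):
--     if numberOfIdentifiedLines > 3 and t > 0:
--         return False
--
--     stattopair = [[4, 5, 6], [4, 7, 8], [5, 7, 9], [6, 8, 9]]
--
--     for a in range(4):
--         incomplete = False
--         value = 0
--         if i == a:
--             value = singlefactor * t
--         else:
--             if flametiers[a] == -1:
--                 incomplete = True
--             else:
--                 value = singlefactor * flametiers[a]
--         for x in stattopair[a]: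
--             if i == x:
--                 value += t * pairfactor
--             else:
--                 if flametiers[x] != -1:
--                     value += flametiers[x] * pairfactor
--                 else:
--                     incomplete = True
--
--         if equipstats[a] < value:
--             return False
--         if not incomplete and value != equipstats[a]:
--             return False
--
--     return True
-- ===== SOURCE B (Python) =====
-- def satisfyConstraints(equipstats, flametiers, numberOfIdentifiedLines, singlefactor, pairfactor, i, t):
--     if numberOfIdentifiedLines > 3 and t > 0:
--         return False
--
--     # Transposed (scatter) formulation: instead of gathering contributors per stat,
--     # walk the 10 flame lines once and scatter each line's contribution to the
--     # stats it affects, then check all four constraints at the end.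
--     linetostats = [[0], [1], [2], [3], [0, 1], [0, 2], [0, 3], [1, 2], [1, 3], [2, 3]]
--     values = [0, 0, 0, 0]
--     incomplete = [False, False, False, False]
--     for x in range(10):
--         factor = singlefactor if x < 4 else pairfactor
--         if x == i:
--             contrib = factor * t
--         elif flametiers[x] != -1:
--             contrib = factor * flametiers[x]
--         else:
--             for a in linetostats[x]:
--                 incomplete[a] = True
--             continue
--         for a in linetostats[x]:
--             values[a] += contrib
--     return all(values[a] <= equipstats[a] and (incomplete[a] or values[a] == equipstats[a])
--                for a in range(4))
-- ===== Notes on version B (the rewrite author's own statement) =====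
-- stated objective: alternative
-- what changed: Transposes the computation: instead of A's gather (per stat, branch on the single line then a mutating loop over its three paired lines), B makes one scatter pass over the 10 flame lines using a line-to-stats incidence table, accumulating a per-stat value array and incomplete-flag array, and checks the four constraints afterwards with all().
-- outside the precondition, e.g. on satisfyConstraints([-100, 0, 0, 0], [0, 0, 0, 0, 0, 0, 0], 0, 1, 1, 0, 1): A returns False, B raises IndexError
import Mathlib
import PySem

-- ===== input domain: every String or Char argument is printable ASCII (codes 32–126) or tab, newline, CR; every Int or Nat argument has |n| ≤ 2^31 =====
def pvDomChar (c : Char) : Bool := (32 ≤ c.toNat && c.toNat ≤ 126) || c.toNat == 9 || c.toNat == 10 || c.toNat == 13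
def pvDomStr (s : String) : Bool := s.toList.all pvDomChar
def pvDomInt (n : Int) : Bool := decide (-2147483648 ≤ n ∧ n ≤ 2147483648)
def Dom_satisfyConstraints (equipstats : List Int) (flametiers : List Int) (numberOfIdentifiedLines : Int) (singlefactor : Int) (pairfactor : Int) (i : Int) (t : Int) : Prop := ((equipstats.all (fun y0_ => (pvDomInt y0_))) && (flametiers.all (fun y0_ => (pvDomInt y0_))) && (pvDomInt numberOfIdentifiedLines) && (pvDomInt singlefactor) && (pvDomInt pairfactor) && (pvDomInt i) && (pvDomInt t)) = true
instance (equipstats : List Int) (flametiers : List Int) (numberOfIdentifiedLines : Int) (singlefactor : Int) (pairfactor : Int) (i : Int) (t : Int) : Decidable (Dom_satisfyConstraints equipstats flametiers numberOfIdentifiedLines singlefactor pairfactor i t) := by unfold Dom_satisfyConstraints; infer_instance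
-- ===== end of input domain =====

-- B transposes A's gather (per stat, over its contributing lines) into one scatter pass over the
-- 10 flame lines via a line-to-stats incidence table, then checks the four constraints (objective: alternative).

-- ===== PORT A =====
-- per-stat body of A's outer loop: the head if/else assignment, then the mutating fold over stattopair[a]
def pvAStat (flametiers : List Int) (singlefactor : Int) (pairfactor : Int) (i : Int) (t : Int) (a : Int) (row : List Int) : Bool × Int :=
  let init : Bool × Int :=
    if i = a then (false, singlefactor * t)
    else if PySem.List.pyGetD flametiers a 0 = -1 then (true, 0)
    else (false, singlefactor * PySem.List.pyGetD flametiers a 0)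
  row.foldl (fun p x =>
    if i = x then (p.1, p.2 + t * pairfactor)
    else if PySem.List.pyGetD flametiers x 0 ≠ -1 then (p.1, p.2 + PySem.List.pyGetD flametiers x 0 * pairfactor)
    else (true, p.2)) init

-- A's 'for a in range(4)' with its two early returns
def pvALoop (equipstats : List Int) (flametiers : List Int) (singlefactor : Int) (pairfactor : Int) (i : Int) (t : Int) : List Int → Bool
  | [] => true
  | a :: rest =>
    let row := PySem.List.pyGetD ([[4, 5, 6], [4, 7, 8], [5, 7, 9], [6, 8, 9]] : List (List Int)) a []
    let s := pvAStat flametiers singlefactor pairfactor i t a row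
    if PySem.List.pyGetD equipstats a 0 < s.2 then false
    else if s.1 = false ∧ s.2 ≠ PySem.List.pyGetD equipstats a 0 then false
    else pvALoop equipstats flametiers singlefactor pairfactor i t rest

def satisfyConstraints (equipstats : List Int) (flametiers : List Int) (numberOfIdentifiedLines : Int) (singlefactor : Int) (pairfactor : Int) (i : Int) (t : Int) : Bool :=
  if numberOfIdentifiedLines > 3 ∧ t > 0 then false
  else pvALoop equipstats flametiers singlefactor pairfactor i t (PySem.List.pyRange 0 4 1)

-- ===== PORT B =====
-- B's line-to-stats incidence table (entries are the small stat indices 0..3, ported as Nat)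
def pvLineToStats : List (List Nat) := [[0], [1], [2], [3], [0, 1], [0, 2], [0, 3], [1, 2], [1, 3], [2, 3]]

-- body of B's 'for x in range(10)': pick the factor, branch, scatter into values / incomplete
def pvBStep (flametiers : List Int) (singlefactor : Int) (pairfactor : Int) (i : Int) (t : Int)
    (s : List Int × List Bool) (x : Int) : List Int × List Bool :=
  let stats := PySem.List.pyGetD pvLineToStats x []
  let factor := if x < 4 then singlefactor else pairfactor
  if x = i then
    (stats.foldl (fun v a => v.modify a (· + factor * t)) s.1, s.2)
  else if PySem.List.pyGetD flametiers x 0 ≠ -1 then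
    (stats.foldl (fun v a => v.modify a (· + factor * PySem.List.pyGetD flametiers x 0)) s.1, s.2)
  else
    (s.1, stats.foldl (fun inc a => inc.set a true) s.2)

def satisfyConstraints_alt (equipstats : List Int) (flametiers : List Int) (numberOfIdentifiedLines : Int) (singlefactor : Int) (pairfactor : Int) (i : Int) (t : Int) : Bool :=
  if numberOfIdentifiedLines > 3 ∧ t > 0 then false
  else
    let s := (PySem.List.pyRange 0 10 1).foldl (pvBStep flametiers singlefactor pairfactor i t)
      ([0, 0, 0, 0], [false, false, false, false])
    (PySem.List.pyRange 0 4 1).all (fun a =>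
      decide (PySem.List.pyGetD s.1 a 0 ≤ PySem.List.pyGetD equipstats a 0) &&
      (PySem.List.pyGetD s.2 a false || decide (PySem.List.pyGetD s.1 a 0 = PySem.List.pyGetD equipstats a 0)))

-- ===== PRECONDITION & SPEC =====
-- Pre_ excludes exactly the inputs on which one of the programs raises IndexError: unless the
-- leading guard returns early, the task indexes equipstats[0..3] and flametiers[0..9]; on shorter
-- lists A may return False early where B's eager line pass raises (see claim cites), so both
-- short-list shapes are excluded.
def Pre_satisfyConstraints (equipstats : List Int) (flametiers : List Int) (numberOfIdentifiedLines : Int) (singlefactor : Int) (pairfactor : Int) (i : Int) (t : Int) : Prop :=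
  (numberOfIdentifiedLines > 3 ∧ t > 0) ∨ (4 ≤ equipstats.length ∧ 10 ≤ flametiers.length)
instance (equipstats : List Int) (flametiers : List Int) (numberOfIdentifiedLines : Int) (singlefactor : Int) (pairfactor : Int) (i : Int) (t : Int) : Decidable (Pre_satisfyConstraints equipstats flametiers numberOfIdentifiedLines singlefactor pairfactor i t) := by unfold Pre_satisfyConstraints; infer_instance

def pvWitness_satisfyConstraints : List Int × List Int × Int × Int × Int × Int × Int :=
  ([9, 9, 9, 9], [1, 1, 1, 1, 1, 1, 1, 1, 1, 1], 2, 1, 1, 0, 1)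

def Spec_satisfyConstraints (equipstats : List Int) (flametiers : List Int) (numberOfIdentifiedLines : Int) (singlefactor : Int) (pairfactor : Int) (i : Int) (t : Int) (out : Bool) : Prop := out = satisfyConstraints_alt equipstats flametiers numberOfIdentifiedLines singlefactor pairfactor i t
instance (equipstats : List Int) (flametiers : List Int) (numberOfIdentifiedLines : Int) (singlefactor : Int) (pairfactor : Int) (i : Int) (t : Int) (out : Bool) : Decidable (Spec_satisfyConstraints equipstats flametiers numberOfIdentifiedLines singlefactor pairfactor i t out) := by unfold Spec_satisfyConstraints; infer_instance

-- ===== CLAIM (what is proved, stated in full; the proofs are below) =====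
def Claim_equal_satisfyConstraints : Prop := ∀ (equipstats : List Int) (flametiers : List Int) (numberOfIdentifiedLines : Int) (singlefactor : Int) (pairfactor : Int) (i : Int) (t : Int), Dom_satisfyConstraints equipstats flametiers numberOfIdentifiedLines singlefactor pairfactor i t → Pre_satisfyConstraints equipstats flametiers numberOfIdentifiedLines singlefactor pairfactor i t → Spec_satisfyConstraints equipstats flametiers numberOfIdentifiedLines singlefactor pairfactor i t (satisfyConstraints equipstats flametiers numberOfIdentifiedLines singlefactor pairfactor i t)

-- ===== LEMMAS AND PROOFS =====

-- closed-form contribution of line x with factor f, and its "unknown" flag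
def pvC (flametiers : List Int) (i t : Int) (x f : Int) : Int :=
  if i = x then f * t
  else if PySem.List.pyGetD flametiers x 0 ≠ -1 then f * PySem.List.pyGetD flametiers x 0
  else 0

def pvU (flametiers : List Int) (i : Int) (x : Int) : Bool :=
  decide (i ≠ x ∧ PySem.List.pyGetD flametiers x 0 = -1)

-- A's inner pair fold in closed form
theorem pvAStat_fold (flametiers : List Int) (pairfactor i t : Int) (row : List Int) :
    ∀ p : Bool × Int,
      row.foldl (fun p x =>
        if i = x then (p.1, p.2 + t * pairfactor)
        else if PySem.List.pyGetD flametiers x 0 ≠ -1 then (p.1, p.2 + PySem.List.pyGetD flametiers x 0 * pairfactor)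
        else (true, p.2)) p
      = (p.1 || row.any (pvU flametiers i),
         p.2 + (row.map (fun x => pvC flametiers i t x pairfactor)).sum) := by
  induction row with
  | nil => intro p; simp
  | cons x row ih =>
    intro p
    simp only [List.foldl_cons, List.any_cons, List.map_cons, List.sum_cons]
    by_cases h : i = x
    · rw [if_pos h, ih]
      simp [pvU, pvC, h, mul_comm, add_assoc]
    · by_cases h2 : PySem.List.pyGetD flametiers x 0 = -1
      · rw [if_neg h]
        simp only [h2, ne_eq, not_true_eq_false, if_false]
        rw [ih]
        simp [pvU, pvC, h, h2, add_assoc]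
      · rw [if_neg h, if_pos (by simpa using h2), ih]
        simp [pvU, pvC, h, h2, mul_comm, add_assoc]

-- A's per-stat result in closed form
theorem pvAStat_closed (flametiers : List Int) (singlefactor pairfactor i t a : Int) (row : List Int) :
    pvAStat flametiers singlefactor pairfactor i t a row
      = (pvU flametiers i a || row.any (pvU flametiers i),
         pvC flametiers i t a singlefactor + (row.map (fun x => pvC flametiers i t x pairfactor)).sum) := by
  unfold pvAStat
  rw [pvAStat_fold]
  by_cases h : i = a
  · simp [pvU, pvC, h]
  · by_cases h2 : PySem.List.pyGetD flametiers a 0 = -1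
    · simp [pvU, pvC, h, h2]
    · simp [pvU, pvC, h, h2]

-- value-wise no-op modification, used to give the three branches of pvBStep one shape
theorem pv_modify_id {α : Type} (l : List α) (j : Nat) : l.modify j (fun x => x) = l := by
  induction l generalizing j with
  | nil => simp
  | cons y l ih => cases j with
    | zero => simp [List.modify]
    | succ j => rw [List.modify_succ_cons, ih]

-- one shape for every branch of pvBStep at a single-stat line
theorem pvBStep_single (flametiers : List Int) (sf pf i t : Int) (v : List Int) (b : List Bool)
    (x : Int) (j : Nat) (f : Int)
    (hst : PySem.List.pyGetD pvLineToStats x [] = [j])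
    (hf : (if x < 4 then sf else pf) = f) :
    pvBStep flametiers sf pf i t (v, b) x
      = (v.modify j (· + pvC flametiers i t x f), b.modify j (· || pvU flametiers i x)) := by
  unfold pvBStep
  rw [hst]
  simp only [hf, List.foldl_cons, List.foldl_nil]
  by_cases h : x = i
  · subst h
    simp [pvC, pvU, pv_modify_id]
  · have h' : ¬ i = x := fun hh => h hh.symm
    by_cases h2 : PySem.List.pyGetD flametiers x 0 = -1
    · simp [pvC, pvU, h, h', h2, pv_modify_id, List.set_eq_modify]
    · simp [pvC, pvU, h, h', h2, pv_modify_id]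

-- one shape for every branch of pvBStep at a paired line
theorem pvBStep_pair (flametiers : List Int) (sf pf i t : Int) (v : List Int) (b : List Bool)
    (x : Int) (j k : Nat) (f : Int)
    (hst : PySem.List.pyGetD pvLineToStats x [] = [j, k])
    (hf : (if x < 4 then sf else pf) = f) :
    pvBStep flametiers sf pf i t (v, b) x
      = ((v.modify j (· + pvC flametiers i t x f)).modify k (· + pvC flametiers i t x f),
         (b.modify j (· || pvU flametiers i x)).modify k (· || pvU flametiers i x)) := by
  unfold pvBStep
  rw [hst]
  simp only [hf, List.foldl_cons, List.foldl_nil]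
  by_cases h : x = i
  · subst h
    simp [pvC, pvU, pv_modify_id]
  · have h' : ¬ i = x := fun hh => h hh.symm
    by_cases h2 : PySem.List.pyGetD flametiers x 0 = -1
    · simp [pvC, pvU, h, h', h2, pv_modify_id, List.set_eq_modify]
    · simp [pvC, pvU, h, h', h2, pv_modify_id]

-- B's scatter fold over the ten lines in closed form
theorem pvBFold_closed (flametiers : List Int) (sf pf i t : Int) :
    (PySem.List.pyRange 0 10 1).foldl (pvBStep flametiers sf pf i t)
      ([0, 0, 0, 0], [false, false, false, false])
    = ([pvC flametiers i t 0 sf + pvC flametiers i t 4 pf + pvC flametiers i t 5 pf + pvC flametiers i t 6 pf,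
        pvC flametiers i t 1 sf + pvC flametiers i t 4 pf + pvC flametiers i t 7 pf + pvC flametiers i t 8 pf,
        pvC flametiers i t 2 sf + pvC flametiers i t 5 pf + pvC flametiers i t 7 pf + pvC flametiers i t 9 pf,
        pvC flametiers i t 3 sf + pvC flametiers i t 6 pf + pvC flametiers i t 8 pf + pvC flametiers i t 9 pf],
       [pvU flametiers i 0 || pvU flametiers i 4 || pvU flametiers i 5 || pvU flametiers i 6,
        pvU flametiers i 1 || pvU flametiers i 4 || pvU flametiers i 7 || pvU flametiers i 8,
        pvU flametiers i 2 || pvU flametiers i 5 || pvU flametiers i 7 || pvU flametiers i 9,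
        pvU flametiers i 3 || pvU flametiers i 6 || pvU flametiers i 8 || pvU flametiers i 9]) := by
  have hr : PySem.List.pyRange 0 10 1 = [0, 1, 2, 3, 4, 5, 6, 7, 8, 9] := by decide
  rw [hr]
  simp only [List.foldl_cons, List.foldl_nil]
  rw [pvBStep_single flametiers sf pf i t _ _ 0 0 sf (by decide) (if_pos (by norm_num)),
      pvBStep_single flametiers sf pf i t _ _ 1 1 sf (by decide) (if_pos (by norm_num)),
      pvBStep_single flametiers sf pf i t _ _ 2 2 sf (by decide) (if_pos (by norm_num)),
      pvBStep_single flametiers sf pf i t _ _ 3 3 sf (by decide) (if_pos (by norm_num)),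
      pvBStep_pair flametiers sf pf i t _ _ 4 0 1 pf (by decide) (if_neg (by norm_num)),
      pvBStep_pair flametiers sf pf i t _ _ 5 0 2 pf (by decide) (if_neg (by norm_num)),
      pvBStep_pair flametiers sf pf i t _ _ 6 0 3 pf (by decide) (if_neg (by norm_num)),
      pvBStep_pair flametiers sf pf i t _ _ 7 1 2 pf (by decide) (if_neg (by norm_num)),
      pvBStep_pair flametiers sf pf i t _ _ 8 1 3 pf (by decide) (if_neg (by norm_num)),
      pvBStep_pair flametiers sf pf i t _ _ 9 2 3 pf (by decide) (if_neg (by norm_num))]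
  simp [List.modify]

-- Bool bridge between A's strict-less test and B's ≤ test
theorem pv_not_lt (e v : Int) : (!decide (e < v)) = decide (v ≤ e) := by
  by_cases h : e < v
  · simp [h, show ¬ v ≤ e by omega]
  · simp [h, show v ≤ e by omega]

-- A's check chain step equals one conjunct of B's all()
theorem pv_pass_step (e v : Int) (inc r : Bool) :
    (if e < v then false else if inc = false ∧ v ≠ e then false else r)
      = ((decide (v ≤ e) && (inc || decide (v = e))) && r) := by
  split_ifs with h1 h2
  · simp [show ¬ v ≤ e by omega]
  · cases inc <;> simp_all
  · have : v ≤ e := by omega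
    push_neg at h2
    cases inc <;> simp_all

-- ===== VERDICT (by name: the statement is the Claim_ definition above) =====
theorem satisfyConstraints_spec : Claim_equal_satisfyConstraints := by
  intro equipstats flametiers numberOfIdentifiedLines singlefactor pairfactor i t _ _
  unfold Spec_satisfyConstraints satisfyConstraints satisfyConstraints_alt
  by_cases hg : numberOfIdentifiedLines > 3 ∧ t > 0
  · simp [hg]
  · rw [if_neg hg, if_neg hg]
    rw [pvBFold_closed]
    have hr4 : PySem.List.pyRange 0 4 1 = [0, 1, 2, 3] := by decide
    rw [hr4]
    simp only [pvALoop, pvAStat_closed, List.all_cons, List.all_nil,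
      PySem.List.pyGetD_ofNat']
    norm_num [pv_pass_step, pv_not_lt, add_assoc, Bool.or_assoc, Bool.and_assoc, List.any_cons]
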